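-- pv_equiv track=rewrite | github.com/BoksicIva/AI | lab3py/id3.py | labels_frequency_key
-- ===== SOURCE A (Python) =====
-- def labels_frequency_key(dataframerows, index, key, target_index):
--     frequency = {}
--
--     for row in dataframerows:
--         if row.__getitem__(index) == key:
--             value = row.__getitem__(target_index)
--             if value in frequency:
--                 frequency[value] += 1
--             else:
--                 frequency[value] = 1
--
--     sortedDict = dict(sorted(frequency.items(), key=lambda x: x[0].lower()))
--     return sortedDict
-- ===== SOURCE B (Python) =====
-- def labels_frequency_key(dataframerows, index, key, target_index):
--     # Bucket matching labels by their case-folded form; each bucket is a small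
--     # dict counting exact labels in first-appearance order.  Sorting only the
--     # distinct case-folded keys and flattening the buckets reproduces A's
--     # "sorted by x[0].lower()" item order (ties keep first-appearance order).
--     groups = {}
--     for row in dataframerows:
--         if row[index] == key:
--             value = row[target_index]
--             bucket = groups.setdefault(value.lower(), {})
--             bucket[value] = bucket.get(value, 0) + 1
--     result = {}
--     for lk in sorted(groups):
--         result.update(groups[lk])
--     return result
-- ===== Notes on version B (the rewrite author's own statement) =====
-- stated objective: alternative
-- what changed: A builds one flat label->count dict over all matching rows and then sorts the dict's items by x[0].lower(); B uses a different data structure: a dict of buckets keyed by the case-folded label (each bucket a small count dict in first-appearance order), sorts only the distinct case-folded keys, and flattens the buckets, so no item list is ever sorted.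
import Mathlib
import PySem

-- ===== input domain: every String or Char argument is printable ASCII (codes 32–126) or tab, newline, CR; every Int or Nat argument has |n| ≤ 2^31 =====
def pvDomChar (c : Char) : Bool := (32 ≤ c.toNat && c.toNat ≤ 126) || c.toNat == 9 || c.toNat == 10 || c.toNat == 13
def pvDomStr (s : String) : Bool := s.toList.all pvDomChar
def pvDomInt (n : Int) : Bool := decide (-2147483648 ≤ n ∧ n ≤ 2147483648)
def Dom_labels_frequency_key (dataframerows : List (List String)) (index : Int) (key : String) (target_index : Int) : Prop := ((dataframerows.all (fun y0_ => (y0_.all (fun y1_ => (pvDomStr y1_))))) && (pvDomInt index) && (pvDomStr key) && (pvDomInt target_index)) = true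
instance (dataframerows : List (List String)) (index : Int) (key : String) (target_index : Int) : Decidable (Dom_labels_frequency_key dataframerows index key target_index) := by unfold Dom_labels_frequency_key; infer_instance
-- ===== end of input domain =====

-- B replaces A's flat count-dict + trailing item sort by a different data structure: a dict of
-- buckets keyed by the case-folded label, each bucket counting exact labels; only the distinct
-- case-folded keys are sorted and the buckets flattened (alternative decomposition, same cost class).

-- ===== PORT A =====
-- literal port of A: build the frequency dict row by row, then sort its items by x[0].lower().
-- The 'none' branches of pyGet? are Python's IndexError; Pre_ excludes them.
def labels_frequency_key (dataframerows : List (List String)) (index : Int) (key : String) (target_index : Int) : List (String × Int) :=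
  let frequency : PySem.Dict String Int :=
    dataframerows.foldl (fun d row =>
      match PySem.List.pyGet? row index with
      | none => d  -- IndexError (excluded by Pre_)
      | some v =>
        if v = key then
          match PySem.List.pyGet? row target_index with
          | none => d  -- IndexError (excluded by Pre_)
          | some value =>
            if d.contains value then d.modify value 0 (· + 1)
            else d.insert value 1
        else d) PySem.Dict.empty
  (PySem.Dict.ofList (PySem.List.sorted frequency.items (fun x => PySem.Str.lower x.1))).items

-- ===== PORT B =====
-- literal port of Source B: bucket matching labels by value.lower() into a dict of count-dicts
-- (setdefault + in-place update = insert of the updated bucket), then fold the buckets into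
-- 'result' following sorted(groups) and return result's items.
def labels_frequency_key_alt (dataframerows : List (List String)) (index : Int) (key : String) (target_index : Int) : List (String × Int) :=
  let groups : PySem.Dict String (PySem.Dict String Int) :=
    dataframerows.foldl (fun g row =>
      match PySem.List.pyGet? row index with
      | none => g  -- IndexError (excluded by Pre_)
      | some v =>
        if v = key then
          match PySem.List.pyGet? row target_index with
          | none => g  -- IndexError (excluded by Pre_)
          | some value =>
            let lk := PySem.Str.lower value
            let bucket := g.getD lk PySem.Dict.empty
            g.insert lk (bucket.insert value (bucket.getD value 0 + 1))
        else g) PySem.Dict.empty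
  let result : PySem.Dict String Int :=
    (PySem.List.sorted groups.keys (fun k => k)).foldl
      (fun r lk => (groups.getD lk PySem.Dict.empty).items.foldl (fun r p => r.insert p.1 p.2) r) PySem.Dict.empty
  result.items

-- ===== PRECONDITION & SPEC =====
-- Pre_ excludes exactly the inputs where Python raises IndexError: some row[index] is out of
-- range, or a row matching the key has row[target_index] out of range.
def Pre_labels_frequency_key (dataframerows : List (List String)) (index : Int) (key : String) (target_index : Int) : Prop :=
  ∀ row ∈ dataframerows, PySem.Raise.InRange row.length index ∧
    (PySem.List.pyGet? row index = some key → PySem.Raise.InRange row.length target_index)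
instance (dataframerows : List (List String)) (index : Int) (key : String) (target_index : Int) : Decidable (Pre_labels_frequency_key dataframerows index key target_index) := by unfold Pre_labels_frequency_key; infer_instance
def pvWitness_labels_frequency_key : List (List String) × Int × String × Int :=
  ([["a", "x"], ["b", "y"], ["a", "X"], ["a", "x"]], 0, "a", 1)

def Spec_labels_frequency_key (dataframerows : List (List String)) (index : Int) (key : String) (target_index : Int) (out : List (String × Int)) : Prop := out = labels_frequency_key_alt dataframerows index key target_index
instance (dataframerows : List (List String)) (index : Int) (key : String) (target_index : Int) (out : List (String × Int)) : Decidable (Spec_labels_frequency_key dataframerows index key target_index out) := by unfold Spec_labels_frequency_key; infer_instance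

-- ===== CLAIM (what is proved, stated in full; the proofs are below) =====
def Claim_equal_labels_frequency_key : Prop := ∀ (dataframerows : List (List String)) (index : Int) (key : String) (target_index : Int), Dom_labels_frequency_key dataframerows index key target_index → Pre_labels_frequency_key dataframerows index key target_index → Spec_labels_frequency_key dataframerows index key target_index (labels_frequency_key dataframerows index key target_index)

-- ===== LEMMAS AND PROOFS =====

-- the labels of the rows matching the key, in row order (shared normal form of both ports' loops)
def pvMatched (dataframerows : List (List String)) (index : Int) (key : String) (target_index : Int) : List String :=
  dataframerows.filterMap (fun row =>
    match PySem.List.pyGet? row index with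
    | none => none
    | some v => if v = key then PySem.List.pyGet? row target_index else none)

-- under Pre_, any row loop of this if-match shape is a fold of its step over pvMatched.
lemma rowfold_eq_matched {σ : Type} (rows : List (List String)) (index : Int) (key : String)
    (target_index : Int) (step : σ → String → σ)
    (hpre : ∀ row ∈ rows, PySem.Raise.InRange row.length index ∧
      (PySem.List.pyGet? row index = some key → PySem.Raise.InRange row.length target_index)) :
    ∀ s : σ,
      rows.foldl (fun s row =>
        match PySem.List.pyGet? row index with
        | none => s
        | some v =>
          if v = key then
            match PySem.List.pyGet? row target_index with
            | none => s
            | some value => step s value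
          else s) s
      = (pvMatched rows index key target_index).foldl step s := by
  induction rows with
  | nil => intro s; rfl
  | cons row rest ih =>
    intro s
    have hrow := hpre row (by simp)
    have hrest : ∀ r ∈ rest, PySem.Raise.InRange r.length index ∧
        (PySem.List.pyGet? r index = some key → PySem.Raise.InRange r.length target_index) :=
      fun r hr => hpre r (by simp [hr])
    obtain ⟨v, hv⟩ : ∃ v, PySem.List.pyGet? row index = some v := by
      rcases h : PySem.List.pyGet? row index with _ | v
      · exact absurd ((PySem.List.pyGet?_eq_none_iff row index).mp h) (not_not_intro hrow.1)
      · exact ⟨v, rfl⟩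
    by_cases hk : v = key
    · obtain ⟨value, hval⟩ : ∃ w, PySem.List.pyGet? row target_index = some w := by
        rcases h : PySem.List.pyGet? row target_index with _ | w
        · exact absurd ((PySem.List.pyGet?_eq_none_iff row target_index).mp h)
            (not_not_intro (hrow.2 (by rw [hv, hk])))
        · exact ⟨w, rfl⟩
      simp only [pvMatched, List.foldl_cons, List.filterMap_cons, hv, hval, hk]
      exact ih hrest _
    · simp only [pvMatched, List.foldl_cons, List.filterMap_cons, hv, if_neg hk]
      exact ih hrest _

-- A's loop body is exactly Counter's step: on an absent key, insert value 1 = modify value 0 (+1).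
lemma astep_eq_modify (d : PySem.Dict String Int) (value : String) :
    (if d.contains value then d.modify value 0 (· + 1) else d.insert value 1)
      = d.modify value 0 (· + 1) := by
  split_ifs with h
  · rfl
  · simp [PySem.Dict.modify, PySem.Dict.getD_of_not_contains d (0 : Int) (by simpa using h)]

-- stable insertion commutes with decorating each element, when the decoration preserves the sort key.
lemma insertBy_map {α β : Type} (f : α → β) (bef : β → β → Bool) (bef' : α → α → Bool)
    (h : ∀ a b, bef (f a) (f b) = bef' a b) (x : α) :
    ∀ ys : List α, PySem.List.insertBy bef (f x) (ys.map f) = (PySem.List.insertBy bef' x ys).map f := by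
  intro ys
  induction ys with
  | nil => rfl
  | cons y t ih =>
    simp only [List.map_cons, PySem.List.insertBy, h]
    split_ifs <;> simp [ih]

lemma foldl_insertBy_map {α β : Type} (f : α → β) (bef : β → β → Bool) (bef' : α → α → Bool)
    (h : ∀ a b, bef (f a) (f b) = bef' a b) :
    ∀ (l acc : List α),
      (l.map f).foldl (fun a x => PySem.List.insertBy bef x a) (acc.map f)
        = (l.foldl (fun a x => PySem.List.insertBy bef' x a) acc).map f := by
  intro l
  induction l with
  | nil => intro acc; rfl
  | cons x t ih =>
    intro acc
    simp only [List.map_cons, List.foldl_cons]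
    rw [insertBy_map f bef bef' h, ih]

-- sorting a decorated list by a key read off the decoration = decorating the sorted originals.
lemma sorted_map_comm {α β : Type} (f : α → β) (keyb : β → String) (keya : α → String)
    (h : ∀ a, keyb (f a) = keya a) (l : List α) :
    PySem.List.sorted (l.map f) keyb = (PySem.List.sorted l keya).map f := by
  rw [PySem.List.sorted_eq_foldl_insertBy, PySem.List.sorted_eq_foldl_insertBy]
  simpa using foldl_insertBy_map f
    (fun a b => decide (keyb a < keyb b)) (fun a b => decide (keya a < keya b))
    (fun a b => by simp [h]) l []

-- dict(pairs) keeps the pairs when the keys are distinct.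
lemma items_ofList_of_nodup (pairs : List (String × Int)) (h : (pairs.map (·.1)).Nodup) :
    (PySem.Dict.ofList pairs).items = pairs := by
  have : PySem.Dict.ofList pairs
      = pairs.foldl (fun d p => d.insert p.1 p.2) PySem.Dict.empty := rfl
  rw [this]
  have := PySem.Dict.items_foldl_insert_fresh pairs (fun p => p.1) (fun p => p.2)
    PySem.Dict.empty (fun a _ => by simp) h
  simpa using this

-- A's normal form: the distinct matched labels, stably sorted by lower, paired with their counts.
lemma a_normal (dataframerows : List (List String)) (index : Int) (key : String) (target_index : Int)
    (hpre : Pre_labels_frequency_key dataframerows index key target_index) :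
    labels_frequency_key dataframerows index key target_index
      = (PySem.List.sorted (PySem.Set.ofList (pvMatched dataframerows index key target_index))
          (fun l => PySem.Str.lower l)).map
          (fun k => (k, ((pvMatched dataframerows index key target_index).count k : Int))) := by
  set matched := pvMatched dataframerows index key target_index with hm
  have h1 := rowfold_eq_matched dataframerows index key target_index
    (fun (d : PySem.Dict String Int) value =>
      if d.contains value then d.modify value 0 (· + 1) else d.insert value 1)
    hpre PySem.Dict.empty
  have h2 : matched.foldl
      (fun (d : PySem.Dict String Int) value =>
        if d.contains value then d.modify value 0 (· + 1) else d.insert value 1)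
      PySem.Dict.empty = PySem.Dict.counter matched := by
    rw [PySem.Dict.counter_eq_foldl]
    congr 1
    funext d value
    exact astep_eq_modify d value
  have h3 : labels_frequency_key dataframerows index key target_index
      = (PySem.Dict.ofList (PySem.List.sorted (PySem.Dict.counter matched).items
          (fun x => PySem.Str.lower x.1))).items :=
    congrArg (fun z : PySem.Dict String Int =>
      (PySem.Dict.ofList (PySem.List.sorted z.items (fun x => PySem.Str.lower x.1))).items)
      (h1.trans h2)
  rw [h3, PySem.Dict.items_counter]
  rw [sorted_map_comm (fun k => (k, (matched.count k : Int))) (fun x => PySem.Str.lower x.1)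
        (fun l => PySem.Str.lower l) (fun a => rfl)]
  rw [items_ofList_of_nodup]
  simp only [List.map_map]
  have hperm := PySem.List.sorted_perm (PySem.Set.ofList matched) (fun l => PySem.Str.lower l) false
  have : (PySem.List.sorted (PySem.Set.ofList matched) (fun l => PySem.Str.lower l)).Nodup :=
    hperm.nodup_iff.mpr (PySem.Set.nodup_ofList matched)
  simpa only [Function.comp_def, List.map_id'] using this

-- ---- insertBy helpers ----
lemma insertBy_skip {α : Type} (bef : α → α → Bool) (v : α) :
    ∀ xs ys : List α, (∀ x ∈ xs, bef v x = false) →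
      PySem.List.insertBy bef v (xs ++ ys) = xs ++ PySem.List.insertBy bef v ys := by
  intro xs
  induction xs with
  | nil => intro ys _; rfl
  | cons x t ih =>
    intro ys h
    have hx : bef v x = false := h x (by simp)
    rw [List.cons_append,
      show PySem.List.insertBy bef v (x :: (t ++ ys))
        = if bef v x then v :: x :: (t ++ ys) else x :: PySem.List.insertBy bef v (t ++ ys) from rfl,
      hx, ih ys (fun a ha => h a (by simp [ha]))]
    simp

lemma insertBy_front {α : Type} (bef : α → α → Bool) (v : α) :
    ∀ ys : List α, (∀ y ∈ ys, bef v y = true) → PySem.List.insertBy bef v ys = v :: ys := by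
  intro ys h
  cases ys with
  | nil => rfl
  | cons y t =>
    rw [show PySem.List.insertBy bef v (y :: t)
      = if bef v y then v :: y :: t else y :: PySem.List.insertBy bef v t from rfl, h y (by simp)]
    simp

-- ---- inserting one element into a bucket decomposition ----
-- keys strictly increasing, every bucket element carries its key; inserting v whose key is absent
lemma insert_buckets_not_mem (f : String → String) (v : String) :
    ∀ (ks : List String) (Bk : String → List String), ks.Pairwise (· < ·) →
      (∀ lk ∈ ks, ∀ y ∈ Bk lk, f y = lk) → f v ∉ ks →
      PySem.List.insertBy (fun a b => decide (f a < f b)) v (ks.flatMap Bk)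
        = (PySem.List.insertBy (fun a b => decide (a < b)) (f v) ks).flatMap
            (fun lk => if lk = f v then [v] else Bk lk) := by
  intro ks
  induction ks with
  | nil => intro Bk _ _ _; simp [PySem.List.insertBy]
  | cons k t ih =>
    intro Bk hpw hB hnm
    have hkne : f v ≠ k := fun h => hnm (by simp [h])
    by_cases hlt : f v < k
    · have hall : ∀ y ∈ (k :: t).flatMap Bk, (decide (f v < f y) : Bool) = true := by
        intro y hy
        obtain ⟨lk, hlk, hylk⟩ := List.mem_flatMap.mp hy
        have : f y = lk := hB lk hlk y hylk
        rcases List.mem_cons.mp hlk with h | h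
        · simp [this, h, hlt]
        · have : k < f y := by rw [this]; exact (List.pairwise_cons.mp hpw).1 _ h
          simp [lt_trans hlt this]
      rw [insertBy_front _ v _ hall]
      have : PySem.List.insertBy (fun a b => decide (a < b)) (f v) (k :: t) = f v :: k :: t := by
        simp [PySem.List.insertBy, hlt]
      rw [this]
      simp only [List.flatMap_cons, if_pos rfl]
      have : ∀ lk ∈ (k :: t), (if lk = f v then [v] else Bk lk) = Bk lk := by
        intro lk hlk
        have : lk ≠ f v := fun h => hnm (h ▸ hlk)
        simp [this]
      rw [List.flatMap_congr (fun lk hlk => this lk (by simp [hlk])), this k (by simp)]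
      simp
    · have hgt : k < f v := lt_of_le_of_ne (not_lt.mp hlt) (Ne.symm hkne)
      have hskip : ∀ x ∈ Bk k, (decide (f v < f x) : Bool) = false := by
        intro x hx
        have : f x = k := hB k (by simp) x hx
        simp [this, not_lt.mpr (le_of_lt hgt)]
      simp only [List.flatMap_cons]
      rw [insertBy_skip _ v _ _ hskip]
      rw [ih Bk (List.pairwise_cons.mp hpw).2 (fun lk hlk => hB lk (by simp [hlk]))
        (fun h => hnm (by simp [h]))]
      have : PySem.List.insertBy (fun a b => decide (a < b)) (f v) (k :: t)
          = k :: PySem.List.insertBy (fun a b => decide (a < b)) (f v) t := by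
        simp [PySem.List.insertBy, hlt]
      rw [this]
      simp [hkne.symm]

-- inserting v whose key is already one of the buckets: v goes to the end of its bucket
lemma insert_buckets_mem (f : String → String) (v : String) :
    ∀ (ks : List String) (Bk : String → List String), ks.Pairwise (· < ·) →
      (∀ lk ∈ ks, ∀ y ∈ Bk lk, f y = lk) → f v ∈ ks →
      PySem.List.insertBy (fun a b => decide (f a < f b)) v (ks.flatMap Bk)
        = ks.flatMap (fun lk => if lk = f v then Bk lk ++ [v] else Bk lk) := by
  intro ks
  induction ks with
  | nil => intro Bk _ _ h; simp at h
  | cons k t ih =>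
    intro Bk hpw hB hm
    by_cases hk : k = f v
    · subst hk
      have hnt : f v ∉ t := fun h => lt_irrefl _ ((List.pairwise_cons.mp hpw).1 _ h)
      have hskip : ∀ x ∈ Bk (f v), (decide (f v < f x) : Bool) = false := by
        intro x hx
        have : f x = f v := hB (f v) (by simp) x hx
        simp [this]
      simp only [List.flatMap_cons]
      rw [insertBy_skip _ v _ _ hskip]
      have hall : ∀ y ∈ t.flatMap Bk, (decide (f v < f y) : Bool) = true := by
        intro y hy
        obtain ⟨lk, hlk, hylk⟩ := List.mem_flatMap.mp hy
        have : f y = lk := hB lk (by simp [hlk]) y hylk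
        have : f v < f y := by rw [this]; exact (List.pairwise_cons.mp hpw).1 _ hlk
        simp [this]
      rw [insertBy_front _ v _ hall]
      have : ∀ lk ∈ t, (if lk = f v then Bk lk ++ [v] else Bk lk) = Bk lk := by
        intro lk hlk
        have : lk ≠ f v := fun h => hnt (h ▸ hlk)
        simp [this]
      rw [List.flatMap_congr this]
      simp
    · have hmt : f v ∈ t := by
        rcases List.mem_cons.mp hm with h | h
        · exact absurd h.symm hk
        · exact h
      have hgt : k < f v := (List.pairwise_cons.mp hpw).1 _ hmt
      have hskip : ∀ x ∈ Bk k, (decide (f v < f x) : Bool) = false := by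
        intro x hx
        have : f x = k := hB k (by simp) x hx
        simp [this, not_lt.mpr (le_of_lt hgt)]
      simp only [List.flatMap_cons]
      rw [insertBy_skip _ v _ _ hskip]
      rw [ih Bk (List.pairwise_cons.mp hpw).2 (fun lk hlk => hB lk (by simp [hlk])) hmt]
      simp [hk]

-- ---- PySem.Set.ofList bookkeeping ----
lemma ofList_append_singleton {α : Type} [BEq α] (l : List α) (x : α) :
    PySem.Set.ofList (l ++ [x]) = PySem.Set.add (PySem.Set.ofList l) x := by
  simp [PySem.Set.ofList, List.foldl_append]

lemma add_of_mem {α : Type} [BEq α] [LawfulBEq α] (s : PySem.Set α) (x : α) (h : x ∈ s) :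
    PySem.Set.add s x = s := by
  simp [PySem.Set.add, PySem.Set.contains, List.elem_eq_contains, h]

lemma add_of_not_mem {α : Type} [BEq α] [LawfulBEq α] (s : PySem.Set α) (x : α) (h : x ∉ s) :
    PySem.Set.add s x = s ++ [x] := by
  simp [PySem.Set.add, PySem.Set.contains, List.elem_eq_contains, h]

-- dedup of the mapped dedup = dedup of the map
lemma ofList_map_ofList (f : String → String) (xs : List String) :
    PySem.Set.ofList ((PySem.Set.ofList xs).map f) = PySem.Set.ofList (xs.map f) := by
  induction xs using List.reverseRecOn with
  | nil => rfl
  | append_singleton l x ih =>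
    rw [ofList_append_singleton]
    simp only [List.map_append, List.map_singleton]
    rw [ofList_append_singleton]
    by_cases h : x ∈ PySem.Set.ofList l
    · rw [add_of_mem _ _ h, ih]
      have : f x ∈ PySem.Set.ofList (l.map f) := by
        rw [PySem.Set.mem_ofList]
        exact List.mem_map_of_mem ((PySem.Set.mem_ofList l x).mp h)
      rw [add_of_mem _ _ this]
    · rw [add_of_not_mem _ _ h]
      simp only [List.map_append, List.map_singleton]
      rw [ofList_append_singleton, ih]

-- dedup commutes with filter (first occurrences are preserved)
lemma ofList_filter (p : String → Bool) (xs : List String) :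
    PySem.Set.ofList (xs.filter p) = (PySem.Set.ofList xs).filter p := by
  induction xs using List.reverseRecOn with
  | nil => rfl
  | append_singleton l x ih =>
    by_cases hp : p x
    · have hfil : (l ++ [x]).filter p = l.filter p ++ [x] := by simp [List.filter_append, hp]
      rw [hfil, ofList_append_singleton, ofList_append_singleton]
      by_cases h : x ∈ PySem.Set.ofList l
      · have hmem : x ∈ PySem.Set.ofList (l.filter p) := by
          rw [PySem.Set.mem_ofList]
          exact List.mem_filter.mpr ⟨(PySem.Set.mem_ofList l x).mp h, hp⟩
        rw [add_of_mem _ _ h, add_of_mem _ _ hmem, ih]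
      · have hnm : x ∉ PySem.Set.ofList (l.filter p) := fun hc =>
          h ((PySem.Set.mem_ofList l x).mpr (List.mem_filter.mp ((PySem.Set.mem_ofList _ x).mp hc)).1)
        rw [add_of_not_mem _ _ h, add_of_not_mem _ _ hnm, ih, List.filter_append]
        simp [hp]
    · have hfil : (l ++ [x]).filter p = l.filter p := by simp [List.filter_append, hp]
      rw [hfil, ofList_append_singleton]
      by_cases h : x ∈ PySem.Set.ofList l
      · rw [add_of_mem _ _ h, ih]
      · rw [add_of_not_mem _ _ h, ih, List.filter_append]
        simp [hp]

-- ---- the bucket decomposition of the stable sort ----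
lemma sorted_append_singleton {α κ : Type} [LT κ] [DecidableLT κ] (xs : List α) (x : α) (key : α → κ) :
    PySem.List.sorted (xs ++ [x]) key
      = PySem.List.insertBy (fun a b => decide (key a < key b)) x (PySem.List.sorted xs key) := by
  rw [PySem.List.sorted_eq_foldl_insertBy, PySem.List.sorted_eq_foldl_insertBy, List.foldl_append]
  rfl

-- stable sort by f = buckets of equal-f elements (in original order) laid out by increasing f
lemma sorted_bucket (f : String → String) (S : List String) :
    PySem.List.sorted S f
      = (PySem.List.sorted (PySem.Set.ofList (S.map f)) (fun k => k)).flatMap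
          (fun lk => S.filter (fun x => f x == lk)) := by
  induction S using List.reverseRecOn with
  | nil => rfl
  | append_singleton l v ih =>
    rw [sorted_append_singleton, ih]
    simp only [List.map_append, List.map_singleton]
    rw [ofList_append_singleton]
    have hpw : (PySem.List.sorted (PySem.Set.ofList (l.map f)) (fun k => k)).Pairwise (· < ·) :=
      PySem.List.sorted_ofList_pairwise_lt (l.map f)
    have hB : ∀ lk ∈ PySem.List.sorted (PySem.Set.ofList (l.map f)) (fun k => k),
        ∀ y ∈ l.filter (fun x => f x == lk), f y = lk := by
      intro lk _ y hy
      simpa using (List.mem_filter.mp hy).2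
    by_cases hm : f v ∈ PySem.Set.ofList (l.map f)
    · rw [add_of_mem _ _ hm]
      have hm' : f v ∈ PySem.List.sorted (PySem.Set.ofList (l.map f)) (fun k => k) :=
        ((PySem.List.sorted_perm _ _ _).mem_iff).mpr hm
      rw [insert_buckets_mem f v _ _ hpw hB hm']
      apply List.flatMap_congr
      intro lk _
      by_cases h : lk = f v
      · simp [h, List.filter_append]
      · have hne : (f v == lk) = false := beq_eq_false_iff_ne.mpr (fun hc => h hc.symm)
        simp [h, List.filter_append, hne]
    · rw [add_of_not_mem _ _ hm]
      have hm' : f v ∉ PySem.List.sorted (PySem.Set.ofList (l.map f)) (fun k => k) :=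
        fun h => hm (((PySem.List.sorted_perm _ _ _).mem_iff).mp h)
      rw [insert_buckets_not_mem f v _ _ hpw hB hm']
      rw [sorted_append_singleton]
      apply List.flatMap_congr
      intro lk hlk
      by_cases h : lk = f v
      · have hfil : l.filter (fun x => f x == f v) = [] := by
          rw [List.filter_eq_nil_iff]
          intro x hx hc
          refine hm ((PySem.Set.mem_ofList _ _).mpr ?_)
          have hfx : f x = f v := by simpa using hc
          exact hfx ▸ List.mem_map_of_mem hx
        simp [h, hfil, List.filter_append]
      · have hne : (f v == lk) = false := beq_eq_false_iff_ne.mpr (fun hc => h hc.symm)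
        simp [h, List.filter_append, hne]

-- ---- B's groups dict, characterised ----
-- find? by equality on a list
lemma find?_beq {α : Type} [BEq α] [LawfulBEq α] (x : α) :
    ∀ ks : List α, ks.find? (fun a => a == x) = if x ∈ ks then some x else none := by
  intro ks
  induction ks with
  | nil => rfl
  | cons k t ih =>
    rw [List.find?_cons]
    by_cases h : k = x
    · simp [h]
    · have hk : (k == x) = false := by simp [h]
      have hx : x ≠ k := fun hc => h hc.symm
      simp [hk, ih, List.mem_cons, hx]

-- the groups dict after folding B's step over the matched labels
def pvGroups (f : String → String) (m : List String) : PySem.Dict String (PySem.Dict String Int) :=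
  PySem.Dict.mk ((PySem.Set.ofList (m.map f)).map
    (fun lk => (lk, PySem.Dict.counter (m.filter (fun x => f x == lk)))))

lemma get?_pvGroups (f : String → String) (m : List String) (k : String) :
    (pvGroups f m).get? k
      = if k ∈ PySem.Set.ofList (m.map f)
        then some (PySem.Dict.counter (m.filter (fun x => f x == k))) else none := by
  unfold pvGroups PySem.Dict.get?
  rw [List.find?_map]
  rw [show ((fun p : String × PySem.Dict String Int => p.1 == k) ∘
      (fun lk => (lk, PySem.Dict.counter (m.filter (fun x => f x == lk)))))
      = (fun a => a == k) from rfl]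
  rw [find?_beq]
  split_ifs <;> simp

lemma contains_pvGroups (f : String → String) (m : List String) (k : String) :
    (pvGroups f m).contains k = decide (k ∈ PySem.Set.ofList (m.map f)) := by
  have := PySem.Dict.contains_eq_isSome_get? (pvGroups f m) k
  rw [this, get?_pvGroups]
  split_ifs <;> simp_all

lemma getD_pvGroups (f : String → String) (m : List String) (k : String) :
    (pvGroups f m).getD k PySem.Dict.empty
      = if k ∈ PySem.Set.ofList (m.map f)
        then PySem.Dict.counter (m.filter (fun x => f x == k)) else PySem.Dict.empty := by
  rw [show (pvGroups f m).getD k PySem.Dict.empty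
      = ((pvGroups f m).get? k).getD PySem.Dict.empty from rfl, get?_pvGroups]
  split_ifs <;> rfl

lemma counter_append_singleton (xs : List String) (v : String) :
    PySem.Dict.counter (xs ++ [v])
      = (PySem.Dict.counter xs).insert v ((PySem.Dict.counter xs).getD v 0 + 1) := by
  rw [PySem.Dict.counter_eq_foldl, PySem.Dict.counter_eq_foldl, List.foldl_append]
  rfl

lemma groups_fold (f : String → String) (m : List String) :
    m.foldl (fun g value =>
      g.insert (f value) ((g.getD (f value) PySem.Dict.empty).insert value
        ((g.getD (f value) PySem.Dict.empty).getD value 0 + 1))) PySem.Dict.empty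
    = pvGroups f m := by
  induction m using List.reverseRecOn with
  | nil => rfl
  | append_singleton l v ih =>
    rw [List.foldl_append, List.foldl_cons, List.foldl_nil, ih]
    by_cases hm : f v ∈ PySem.Set.ofList (l.map f)
    · have hgetD : (pvGroups f l).getD (f v) PySem.Dict.empty
          = PySem.Dict.counter (l.filter (fun x => f x == f v)) := by
        rw [getD_pvGroups]; simp [hm]
      have hcont : (pvGroups f l).contains (f v) = true := by
        rw [contains_pvGroups]; simpa using hm
      rw [hgetD, ← counter_append_singleton]
      rw [show ∀ (g : PySem.Dict String (PySem.Dict String Int)) k b, g.insert k b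
          = (if g.contains k then PySem.Dict.mk (g.items.map
              (fun p => if p.1 == k then (k, b) else p)) else PySem.Dict.mk (g.items ++ [(k, b)]))
          from fun _ _ _ => rfl, hcont, if_pos rfl]
      unfold pvGroups
      congr 1
      simp only [List.map_append, List.map_singleton]
      rw [ofList_append_singleton, add_of_mem _ _ hm, List.map_map]
      apply List.map_congr_left
      intro lk _
      by_cases h : lk = f v
      · simp [h, Function.comp, List.filter_append]
      · have hne : (f v == lk) = false := beq_eq_false_iff_ne.mpr (fun hc => h hc.symm)
        have hne' : (lk == f v) = false := beq_eq_false_iff_ne.mpr h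
        simp [Function.comp, hne, hne', List.filter_append]
    · have hgetD : (pvGroups f l).getD (f v) PySem.Dict.empty = PySem.Dict.empty := by
        rw [getD_pvGroups]; simp [hm]
      have hcont : (pvGroups f l).contains (f v) = false := by
        rw [contains_pvGroups]; simpa using hm
      rw [hgetD]
      rw [show ∀ (g : PySem.Dict String (PySem.Dict String Int)) k b, g.insert k b
          = (if g.contains k then PySem.Dict.mk (g.items.map
              (fun p => if p.1 == k then (k, b) else p)) else PySem.Dict.mk (g.items ++ [(k, b)]))
          from fun _ _ _ => rfl, hcont]
      rw [if_neg (by simp)]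
      have hfil : l.filter (fun x => f x == f v) = [] := by
        rw [List.filter_eq_nil_iff]
        intro x hx hc
        refine hm ((PySem.Set.mem_ofList _ _).mpr ?_)
        have hfx : f x = f v := by simpa using hc
        exact hfx ▸ List.mem_map_of_mem hx
      have hb : (PySem.Dict.empty : PySem.Dict String Int).insert v
          ((PySem.Dict.empty : PySem.Dict String Int).getD v 0 + 1)
          = PySem.Dict.counter ((l.filter (fun x => f x == f v)) ++ [v]) := by
        rw [hfil]; rfl
      rw [hb]
      unfold pvGroups
      congr 1
      simp only [List.map_append, List.map_singleton]
      rw [ofList_append_singleton, add_of_not_mem _ _ hm, List.map_append, List.map_singleton]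
      refine congrArg₂ (· ++ ·) ?_ ?_
      · apply List.map_congr_left
        intro lk hlk
        have h : lk ≠ f v := fun hc => hm (hc ▸ hlk)
        have hne : (f v == lk) = false := beq_eq_false_iff_ne.mpr (fun hc => h hc.symm)
        simp [hne, List.filter_append]
      · simp [List.filter_append]

-- result fold: inserting bucket items with globally fresh keys just concatenates them
lemma result_fold (f : String → String) :
    ∀ (ks : List String) (L : String → List (String × Int)) (d : PySem.Dict String Int),
      ks.Nodup →
      (∀ lk ∈ ks, ((L lk).map Prod.fst).Nodup ∧ ∀ p ∈ L lk, f p.1 = lk) →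
      (∀ p ∈ d.items, f p.1 ∉ ks) →
      (ks.foldl (fun r lk => (L lk).foldl (fun r p => r.insert p.1 p.2) r) d).items
        = d.items ++ ks.flatMap L := by
  intro ks
  induction ks with
  | nil => intro L d _ _ _; simp
  | cons k t ih =>
    intro L d hnd hL hd
    have hfresh : ∀ p ∈ L k, d.contains p.1 = false := by
      intro p hp
      by_contra h
      have : d.contains p.1 = true := by simpa using h
      obtain ⟨q, hq, hqk⟩ := List.any_eq_true.mp this
      have : q.1 = p.1 := by simpa using hqk
      exact hd q hq (by
        rw [this, (hL k (by simp)).2 p hp]; simp)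
    have hinner := PySem.Dict.items_foldl_insert_fresh (L k) Prod.fst Prod.snd d hfresh
      (hL k (by simp)).1
    simp only [List.foldl_cons]
    have heq : (L k).foldl (fun r p => r.insert p.1 p.2) d
        = (L k).foldl (fun d a => d.insert a.1 a.2) d := rfl
    rw [heq]
    rw [ih L _ (List.nodup_cons.mp hnd).2 (fun lk h => hL lk (by simp [h]))]
    · rw [hinner]
      simp
    · intro p hp
      rw [hinner] at hp
      rcases List.mem_append.mp hp with h | h
      · exact fun hc => hd p h (by simp [hc])
      · obtain ⟨a, ha, hap⟩ := List.mem_map.mp h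
        have : f p.1 = k := by rw [← hap]; exact (hL k (by simp)).2 a ha
        rw [this]
        exact (List.nodup_cons.mp hnd).1

-- B's normal form
lemma b_normal (dataframerows : List (List String)) (index : Int) (key : String) (target_index : Int)
    (hpre : Pre_labels_frequency_key dataframerows index key target_index) :
    labels_frequency_key_alt dataframerows index key target_index
      = (PySem.List.sorted (PySem.Set.ofList (pvMatched dataframerows index key target_index))
          (fun l => PySem.Str.lower l)).map
          (fun k => (k, ((pvMatched dataframerows index key target_index).count k : Int))) := by
  set f : String → String := fun s => PySem.Str.lower s with hf
  set matched := pvMatched dataframerows index key target_index with hm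
  have h1 := rowfold_eq_matched dataframerows index key target_index
    (fun (g : PySem.Dict String (PySem.Dict String Int)) value =>
      g.insert (f value) ((g.getD (f value) PySem.Dict.empty).insert value
        ((g.getD (f value) PySem.Dict.empty).getD value 0 + 1)))
    hpre PySem.Dict.empty
  have h2 := (h1.trans (groups_fold f matched))
  have h3 : labels_frequency_key_alt dataframerows index key target_index
      = ((PySem.List.sorted (pvGroups f matched).keys (fun k => k)).foldl
          (fun (r : PySem.Dict String Int) lk =>
            ((pvGroups f matched).getD lk PySem.Dict.empty).items.foldl
              (fun (r : PySem.Dict String Int) (p : String × Int) => r.insert p.1 p.2) r)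
          PySem.Dict.empty).items :=
    congrArg (fun g : PySem.Dict String (PySem.Dict String Int) =>
      ((PySem.List.sorted g.keys (fun k => k)).foldl
        (fun (r : PySem.Dict String Int) lk => (g.getD lk PySem.Dict.empty).items.foldl
          (fun (r : PySem.Dict String Int) (p : String × Int) => r.insert p.1 p.2) r)
        PySem.Dict.empty).items) h2
  have hkeys : (pvGroups f matched).keys = PySem.Set.ofList (matched.map f) := by
    unfold pvGroups PySem.Dict.keys
    simp only [PySem.Dict.items, List.map_map]
    rw [show ((fun x : String × PySem.Dict String Int => x.1) ∘
      (fun lk => (lk, PySem.Dict.counter (matched.filter (fun x => f x == lk))))) = id from rfl,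
      List.map_id]
  rw [h3, hkeys]
  set ks := PySem.List.sorted (PySem.Set.ofList (matched.map f)) (fun k => k) with hks
  have hmemks : ∀ lk ∈ ks, lk ∈ PySem.Set.ofList (matched.map f) := by
    intro lk hlk
    exact ((PySem.List.sorted_perm _ _ _).mem_iff).mp hlk
  have hnd : ks.Nodup :=
    ((PySem.List.sorted_perm _ _ _).nodup_iff).mpr (PySem.Set.nodup_ofList _)
  have hgetD : ∀ lk ∈ ks, (pvGroups f matched).getD lk PySem.Dict.empty
      = PySem.Dict.counter (matched.filter (fun x => f x == lk)) := by
    intro lk hlk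
    rw [getD_pvGroups, if_pos (hmemks lk hlk)]
  have hLspec : ∀ lk ∈ ks,
      ((((pvGroups f matched).getD lk PySem.Dict.empty).items).map Prod.fst).Nodup ∧
      (∀ p ∈ ((pvGroups f matched).getD lk PySem.Dict.empty).items, f p.1 = lk) := by
    intro lk hlk
    rw [hgetD lk hlk, PySem.Dict.items_counter]
    constructor
    · simp only [List.map_map]
      have : ((fun p : String × Int => p.1) ∘
          (fun k => (k, (List.count k (matched.filter (fun x => f x == lk)) : Int))))
          = fun k => k := rfl
      rw [this]
      simpa using PySem.Set.nodup_ofList (matched.filter (fun x => f x == lk))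
    · intro p hp
      obtain ⟨x, hx, hxp⟩ := List.mem_map.mp hp
      have : x ∈ matched.filter (fun x => f x == lk) := (PySem.Set.mem_ofList _ _).mp hx
      have hfx : f x = lk := by simpa using (List.mem_filter.mp this).2
      rw [← hxp]
      exact hfx
  rw [result_fold f ks _ PySem.Dict.empty hnd hLspec
    (by intro p hp; exact absurd (show p ∈ ([] : List (String × Int)) from hp) (by simp))]
  rw [show (PySem.Dict.empty : PySem.Dict String Int).items = ([] : List (String × Int)) from rfl,
    List.nil_append]
  have hcongr : ∀ lk ∈ ks,
      (((pvGroups f matched).getD lk PySem.Dict.empty).items)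
        = ((PySem.Set.ofList matched).filter (fun x => f x == lk)).map
            (fun k => (k, (matched.count k : Int))) := by
    intro lk hlk
    rw [hgetD lk hlk, PySem.Dict.items_counter, ofList_filter]
    apply List.map_congr_left
    intro x hx
    have hfx : (f x == lk) = true := (List.mem_filter.mp hx).2
    have : List.count x (matched.filter (fun y => f y == lk)) = List.count x matched := by
      rw [List.count_filter]
      simp only [List.mem_filter] at hx
      simp [hfx]
    rw [this]
  rw [List.flatMap_congr hcongr]
  rw [← List.map_flatMap]
  have hbucket := sorted_bucket f (PySem.Set.ofList matched)
  rw [ofList_map_ofList] at hbucket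
  rw [← hbucket]

theorem labels_frequency_key_spec_aux (dataframerows : List (List String)) (index : Int)
    (key : String) (target_index : Int)
    (hpre : Pre_labels_frequency_key dataframerows index key target_index) :
    labels_frequency_key dataframerows index key target_index
      = labels_frequency_key_alt dataframerows index key target_index := by
  rw [a_normal _ _ _ _ hpre, b_normal _ _ _ _ hpre]

-- ===== VERDICT (by name: the statement is the Claim_ definition above) =====
theorem labels_frequency_key_spec : Claim_equal_labels_frequency_key := by
  intro dataframerows index key target_index _ hpre
  exact labels_frequency_key_spec_aux dataframerows index key target_index hpre
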